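-- pv_equiv track=rewrite | github.com/Riteek712/url-shortner-FastAPI | app/utils.py | encode_url
-- ===== SOURCE A (Python) =====
-- def encode_url(id: int) -> str:
--     """Encode an ID into a short string."""
--     characters = "0123456789abcdefghijklmnopqrstuvwxyzABCDEFGHIJKLMNOPQRSTUVWXYZ"
--     base = len(characters)
--     encoded = []
--
--     while id > 0:
--         val = id % base
--         encoded.append(characters[val])
--         id //= base
--
--     return ''.join(reversed(encoded))
-- ===== SOURCE B (Python) =====
-- def encode_url(id: int) -> str:
--     """Encode an ID into a short string, emitting digits most-significant first."""
--     characters = "0123456789abcdefghijklmnopqrstuvwxyzABCDEFGHIJKLMNOPQRSTUVWXYZ"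
--     base = len(characters)
--     if id <= 0:
--         return ''
--     p = 1
--     while p * base <= id:
--         p *= base
--     out = []
--     while p > 0:
--         out.append(characters[id // p % base])
--         p //= base
--     return ''.join(out)
-- ===== Notes on version B (the rewrite author's own statement) =====
-- stated objective: alternative
-- what changed: Instead of appending low-order digits and reversing, B first finds the highest power of the base not exceeding id and then emits digits most-significant first by dividing by descending powers, so no list reversal is needed.
import Mathlib
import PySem

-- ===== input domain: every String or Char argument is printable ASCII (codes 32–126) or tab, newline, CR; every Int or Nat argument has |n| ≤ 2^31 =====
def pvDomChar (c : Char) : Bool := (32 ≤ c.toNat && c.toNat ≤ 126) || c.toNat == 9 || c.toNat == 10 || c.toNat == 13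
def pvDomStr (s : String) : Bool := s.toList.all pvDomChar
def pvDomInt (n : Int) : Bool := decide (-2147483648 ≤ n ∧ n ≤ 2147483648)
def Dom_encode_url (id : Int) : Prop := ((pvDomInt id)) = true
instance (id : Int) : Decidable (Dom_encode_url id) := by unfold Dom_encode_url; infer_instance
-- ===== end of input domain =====

-- B finds the largest base-power not exceeding id and emits digits most-significant first by dividing by descending powers; no reversal. Same values, same cost.

-- ===== PORT A =====
def pvChars : List Char := "0123456789abcdefghijklmnopqrstuvwxyzABCDEFGHIJKLMNOPQRSTUVWXYZ".toList

-- A's while loop: state is (id, encoded); characters[val] is always in range (0 ≤ val < 62), so pyGetD is exact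
def encodeLoopA (id : Int) (encoded : List Char) : List Char :=
  if 0 < id then
    encodeLoopA (PySem.Int.floordiv id 62)
      (encoded ++ [PySem.List.pyGetD pvChars (PySem.Int.mod id 62) ' '])
  else encoded
termination_by id.toNat
decreasing_by
  all_goals
  rw [PySem.Int.floordiv_eq_ediv_of_pos (by norm_num)]
  have h1 : (id / 62) * 62 ≤ id := Int.ediv_mul_le id (by norm_num)
  have h2 : 0 ≤ id / 62 := Int.ediv_nonneg (by omega) (by norm_num)
  omega

def encode_url (id : Int) : String := String.ofList (encodeLoopA id []).reverse

-- ===== PORT B =====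
-- B's first loop: grow p by factors of 62 while p*62 ≤ id (hp is a totality guard only)
def findPowB (id p : Int) (hp : 0 < p) : Int :=
  if _h : p * 62 ≤ id then findPowB id (p * 62) (by positivity) else p
termination_by (id + 1 - p).toNat
decreasing_by
  have : p + 1 ≤ p * 62 := by nlinarith
  omega

-- B's second loop: emit characters[id // p % base] while p > 0, then p //= base
def emitB (id p : Int) : List Char :=
  if _h : 0 < p then
    PySem.List.pyGetD pvChars (PySem.Int.mod (PySem.Int.floordiv id p) 62) ' '
      :: emitB id (PySem.Int.floordiv p 62)
  else []
termination_by p.toNat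
decreasing_by
  rw [PySem.Int.floordiv_eq_ediv_of_pos (by norm_num)]
  have h1 : p / 62 * 62 ≤ p := Int.ediv_mul_le p (by norm_num)
  have h2 : 0 ≤ p / 62 := Int.ediv_nonneg (by omega) (by norm_num)
  omega

def encode_url_alt (id : Int) : String :=
  if id ≤ 0 then ""
  else String.ofList (emitB id (findPowB id 1 one_pos))

-- ===== PRECONDITION & SPEC =====
def Spec_encode_url (id : Int) (out : String) : Prop := out = encode_url_alt id
instance (id : Int) (out : String) : Decidable (Spec_encode_url id out) := by unfold Spec_encode_url; infer_instance

-- ===== CLAIM (what is proved, stated in full; the proofs are below) =====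
def Claim_equal_encode_url : Prop := ∀ (id : Int), Dom_encode_url id → Spec_encode_url id (encode_url id)

-- ===== LEMMAS AND PROOFS =====

-- the first n low-order base-62 digits of id
def pvTrunc (id : Int) (n : Nat) : List Char :=
  match n with
  | 0 => []
  | n + 1 => PySem.List.pyGetD pvChars (id % 62) ' ' :: pvTrunc (id / 62) n

lemma pv_floordiv (a : Int) : PySem.Int.floordiv a 62 = a / 62 :=
  PySem.Int.floordiv_eq_ediv_of_pos (by norm_num)

lemma pv_mod (a : Int) : PySem.Int.mod a 62 = a % 62 :=
  PySem.Int.mod_eq_emod_of_pos (by norm_num)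

-- A's loop only ever appends to the accumulator
lemma encodeLoopA_acc (id : Int) (acc : List Char) :
    encodeLoopA id acc = acc ++ encodeLoopA id [] := by
  rw [encodeLoopA]
  conv_rhs => rw [encodeLoopA]
  split
  · rw [encodeLoopA_acc (PySem.Int.floordiv id 62)
        (acc ++ [PySem.List.pyGetD pvChars (PySem.Int.mod id 62) ' ']),
      encodeLoopA_acc (PySem.Int.floordiv id 62)
        ([] ++ [PySem.List.pyGetD pvChars (PySem.Int.mod id 62) ' '])]
    simp
  · simp
termination_by id.toNat
decreasing_by
  all_goals
  rw [pv_floordiv]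
  have h1 : (id / 62) * 62 ≤ id := Int.ediv_mul_le id (by norm_num)
  have h2 : 0 ≤ id / 62 := Int.ediv_nonneg (by omega) (by norm_num)
  omega

-- appending the next higher digit
lemma pvTrunc_succ (n : Nat) : ∀ id : Int,
    pvTrunc id (n + 1) = pvTrunc id n ++ [PySem.List.pyGetD pvChars (id / 62 ^ n % 62) ' '] := by
  induction n with
  | zero => intro id; simp [pvTrunc]
  | succ n ih =>
    intro id
    rw [pvTrunc, ih (id / 62), pvTrunc]
    have : id / 62 / 62 ^ n = id / 62 ^ (n + 1) := by
      rw [Int.ediv_ediv_of_nonneg (by positivity), pow_succ']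
    simp [this]

-- emitting from power 62^k yields the low k+1 digits, high first
lemma emitB_pow (k : Nat) (id : Int) :
    emitB id ((62 : Int) ^ k) = (pvTrunc id (k + 1)).reverse := by
  induction k with
  | zero =>
    rw [emitB]
    simp [pvTrunc]
    rw [emitB]
    norm_num
  | succ k ih =>
    rw [emitB, dif_pos (by positivity), pv_floordiv, pv_mod]
    have hp : (62 : Int) ^ (k + 1) / 62 = 62 ^ k := by
      rw [pow_succ, Int.mul_ediv_cancel _ (by norm_num)]
    rw [hp, ih, pvTrunc_succ (k + 1)]
    simp

-- A's digit list is exactly the low k+1 digits when 62^k ≤ id < 62^(k+1)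
lemma loopA_eq_trunc (k : Nat) : ∀ id : Int, (62 : Int) ^ k ≤ id → id < 62 ^ (k + 1) →
    encodeLoopA id [] = pvTrunc id (k + 1) := by
  induction k with
  | zero =>
    intro id h1 h2
    have h1' : (1 : Int) ≤ id := by simpa using h1
    have h2' : id < 62 := by simpa using h2
    rw [encodeLoopA, if_pos (by omega), encodeLoopA_acc, pv_floordiv, pv_mod]
    have : id / 62 = 0 := Int.ediv_eq_zero_of_lt (by omega) h2'
    rw [this, encodeLoopA]
    simp [pvTrunc]
  | succ k ih =>
    intro id h1 h2
    have hpos : (0 : Int) < 62 ^ (k + 1) := by positivity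
    rw [encodeLoopA, if_pos (by omega), encodeLoopA_acc, pv_floordiv, pv_mod]
    have hlo : (62 : Int) ^ k ≤ id / 62 := by
      rw [Int.le_ediv_iff_mul_le (by norm_num)]
      calc (62:Int)^k * 62 = 62 ^ (k+1) := by ring
        _ ≤ id := h1
    have hhi : id / 62 < 62 ^ (k + 1) := by
      rw [← pv_floordiv, PySem.Int.floordiv_lt_iff_lt_mul (by norm_num)]
      calc id < 62 ^ (k + 1 + 1) := h2
        _ = 62 ^ (k+1) * 62 := by ring
    rw [ih (id / 62) hlo hhi]
    simp [pvTrunc]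

-- findPowB started at a power of 62 returns the largest power of 62 not exceeding id
lemma findPowB_spec (id : Int) : ∀ p : Int, ∀ hp : 0 < p, (∃ j : Nat, p = 62 ^ j) → p ≤ id →
    ∃ k : Nat, findPowB id p hp = 62 ^ k ∧ (62 : Int) ^ k ≤ id ∧ id < 62 ^ (k + 1) := by
  intro p hp hj hle
  obtain ⟨j, rfl⟩ := hj
  rw [findPowB]
  split
  · rename_i h
    exact findPowB_spec id ((62:Int)^j * 62) (by positivity) ⟨j + 1, by ring⟩ h
  · rename_i h
    exact ⟨j, rfl, hle, by rw [pow_succ]; omega⟩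
termination_by p => (id + 1 - p).toNat
decreasing_by
  have hp62 : (0:Int) < 62 ^ j := by positivity
  have : (62:Int) ^ j + 1 ≤ 62 ^ j * 62 := by nlinarith [hp62]
  omega

-- ===== VERDICT (by name: the statement is the Claim_ definition above) =====
theorem encode_url_spec : Claim_equal_encode_url := by
  intro id _
  show encode_url id = encode_url_alt id
  rw [encode_url, encode_url_alt]
  split
  · rename_i h
    rw [encodeLoopA, if_neg (by omega)]
    rfl
  · rename_i h
    obtain ⟨k, hfp, hlo, hhi⟩ := findPowB_spec id 1 one_pos ⟨0, by norm_num⟩ (by omega)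
    rw [hfp, emitB_pow, loopA_eq_trunc k id hlo hhi]
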